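-- pv_equiv track=rewrite | github.com/rjbarbour/ai-session-vault | scripts/generate_titles.py | truncate_for_enrichment
-- ===== SOURCE A (Python) =====
-- def truncate_for_enrichment(body):
--     """If body exceeds Haiku's context, keep first 20 + last 20 turns."""
--     lines = body.split("\n")
--     turn_indices = [i for i, l in enumerate(lines)
--                     if l.startswith("## User (turn") or l.startswith("## Assistant (turn")]
--
--     if len(turn_indices) <= 40:
--         return body
--
--     cut_start = turn_indices[20]
--     cut_end = turn_indices[-20]
--     kept = (lines[:cut_start]
--             + [f"\n*[... {len(turn_indices) - 40} turns omitted for context limits ...]*\n"]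
--             + lines[cut_end:])
--     return "\n".join(kept)
-- ===== SOURCE B (Python) =====
-- def _is_turn(l):
--     return l.startswith("## User (turn") or l.startswith("## Assistant (turn")
--
--
-- def _head(k, ls):
--     # lines strictly before the (k+1)-th turn-header line
--     out = []
--     for l in ls:
--         if _is_turn(l):
--             if k == 0:
--                 return out
--             k -= 1
--         out.append(l)
--     return out
--
--
-- def _tail(k, ls):
--     # suffix of ls starting at the (k+1)-th turn-header line ([] if none)
--     i = 0
--     for l in ls:
--         if _is_turn(l):
--             if k == 0:
--                 return ls[i:]
--             k -= 1
--         i += 1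
--     return []
--
--
-- def truncate_for_enrichment(body):
--     """Single counting pass plus two streaming cuts; no index list, no enumerate."""
--     lines = body.split("\n")
--     total = 0
--     for l in lines:
--         if _is_turn(l):
--             total += 1
--     if total <= 40:
--         return body
--     marker = "\n*[... " + str(total - 40) + " turns omitted for context limits ...]*\n"
--     return "\n".join(_head(20, lines) + [marker] + _tail(total - 20, lines))
-- ===== Notes on version B (the rewrite author's own statement) =====
-- stated objective: alternative
-- what changed: A enumerates all lines, materialises the full list of turn-header indices and slices around its 21st and 21st-from-last entries; B makes one counting pass for the total and then two streaming cuts that stop at the 21st and the (total-19)-th header line, never building an index list.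
import Mathlib
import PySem

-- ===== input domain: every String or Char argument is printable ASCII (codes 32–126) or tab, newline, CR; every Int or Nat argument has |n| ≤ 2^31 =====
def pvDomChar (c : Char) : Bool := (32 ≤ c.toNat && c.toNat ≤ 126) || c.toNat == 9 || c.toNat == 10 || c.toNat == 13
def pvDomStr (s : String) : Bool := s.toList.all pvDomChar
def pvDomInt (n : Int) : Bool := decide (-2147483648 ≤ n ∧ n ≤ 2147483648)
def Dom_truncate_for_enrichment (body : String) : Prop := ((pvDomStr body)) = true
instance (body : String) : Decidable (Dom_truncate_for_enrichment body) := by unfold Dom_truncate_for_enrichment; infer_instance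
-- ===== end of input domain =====

-- B replaces A's enumerate-and-index-list decomposition by one counting pass plus two
-- streaming cuts that stop at the 21st and (total-19)-th turn header (objective: alternative).

-- ===== PORT A =====
def truncate_for_enrichment (body : String) : String :=
  let lines := (PySem.Str.split? body "\n").getD []   -- sep "\n" ≠ "": split? never none here
  let turn_indices : List Int :=
    ((PySem.List.enumerate lines).filter
      (fun p => PySem.Str.startswith p.2 "## User (turn" || PySem.Str.startswith p.2 "## Assistant (turn")).map
      (fun p => p.1)
  if turn_indices.length ≤ 40 then body
  else
    let cut_start := PySem.List.pyGetD turn_indices 20 0          -- in range: length > 40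
    let cut_end := PySem.List.pyGetD turn_indices (-20) 0         -- in range: length > 40
    let kept :=
      PySem.List.slice lines none (some cut_start)
        ++ ["\n*[... " ++ PySem.Int.toStr ((turn_indices.length : Int) - 40)
              ++ " turns omitted for context limits ...]*\n"]
        ++ PySem.List.slice lines (some cut_end) none
    PySem.Str.join "\n" kept

-- ===== PORT B =====
def pvIsTurn (l : String) : Bool :=
  PySem.Str.startswith l "## User (turn" || PySem.Str.startswith l "## Assistant (turn"

-- lines strictly before the (k+1)-th turn-header line
def pvHead : Nat → List String → List String
  | _, [] => []
  | k, l :: ls =>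
    if pvIsTurn l then
      match k with
      | 0 => []
      | k' + 1 => l :: pvHead k' ls
    else l :: pvHead k ls

-- suffix starting at the (k+1)-th turn-header line ([] if none)
def pvTail : Nat → List String → List String
  | _, [] => []
  | k, l :: ls =>
    if pvIsTurn l then
      match k with
      | 0 => l :: ls
      | k' + 1 => pvTail k' ls
    else pvTail k ls

def truncate_for_enrichment_alt (body : String) : String :=
  let lines := (PySem.Str.split? body "\n").getD []   -- sep "\n" ≠ "": split? never none here
  let total : Int := lines.foldl (fun n l => if pvIsTurn l then n + 1 else n) 0
  if total ≤ 40 then body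
  else
    let marker := "\n*[... " ++ PySem.Int.toStr (total - 40) ++ " turns omitted for context limits ...]*\n"
    PySem.Str.join "\n" (pvHead 20 lines ++ [marker] ++ pvTail (total - 20).toNat lines)

-- ===== PRECONDITION & SPEC =====
def Spec_truncate_for_enrichment (body : String) (out : String) : Prop := out = truncate_for_enrichment_alt body
instance (body : String) (out : String) : Decidable (Spec_truncate_for_enrichment body out) := by unfold Spec_truncate_for_enrichment; infer_instance

-- ===== CLAIM (what is proved, stated in full; the proofs are below) =====
def Claim_equal_truncate_for_enrichment : Prop := ∀ (body : String), Dom_truncate_for_enrichment body → Spec_truncate_for_enrichment body (truncate_for_enrichment body)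

-- ===== LEMMAS AND PROOFS =====

-- indices (0-based) of the turn-header lines
def pvIdx : List String → List Nat
  | [] => []
  | l :: ls => if pvIsTurn l then 0 :: (pvIdx ls).map (· + 1) else (pvIdx ls).map (· + 1)

theorem pvIdx_length (ls : List String) : (pvIdx ls).length = ls.countP pvIsTurn := by
  induction ls with
  | nil => rfl
  | cons l ls ih =>
    simp only [pvIdx, List.countP_cons]
    by_cases h : pvIsTurn l = true <;> simp [h, ih]

theorem pvEnum_filter (ls : List String) (s : Int) :
    ((PySem.List.enumerate ls s).filter (fun p => pvIsTurn p.2)).map (fun p => p.1)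
      = (pvIdx ls).map (fun n : Nat => s + (n : Int)) := by
  induction ls generalizing s with
  | nil => simp [PySem.List.enumerate_nil, pvIdx]
  | cons l ls ih =>
    by_cases h : pvIsTurn l = true
    · simp only [PySem.List.enumerate_cons, pvIdx, h, if_true, List.filter_cons,
        List.map_cons, List.map_map, ih (s + 1), Nat.cast_zero, add_zero]
      exact congrArg (s :: ·) (List.map_congr_left fun n _ => by simp [Function.comp]; ring)
    · simp only [PySem.List.enumerate_cons, pvIdx, h, List.filter_cons,
        Bool.false_eq_true, if_false, ih (s + 1), List.map_map]
      exact List.map_congr_left fun n _ => by simp [Function.comp]; ring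

theorem pvHead_eq_take (ls : List String) (k : Nat) (h : k < (pvIdx ls).length) :
    pvHead k ls = ls.take ((pvIdx ls)[k]'h) := by
  induction ls generalizing k with
  | nil => simp [pvIdx] at h
  | cons l ls ih =>
    by_cases hl : pvIsTurn l = true
    · cases k with
      | zero => simp [pvHead, pvIdx, hl]
      | succ k' =>
        have h' : k' < (pvIdx ls).length := by
          simpa [pvIdx, hl] using h
        simp [pvHead, pvIdx, hl, ih k' h', List.getElem_map]
    · have h' : k < (pvIdx ls).length := by simpa [pvIdx, hl] using h
      simp [pvHead, pvIdx, hl, ih k h', List.getElem_map]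

theorem pvTail_eq_drop (ls : List String) (k : Nat) (h : k < (pvIdx ls).length) :
    pvTail k ls = ls.drop ((pvIdx ls)[k]'h) := by
  induction ls generalizing k with
  | nil => simp [pvIdx] at h
  | cons l ls ih =>
    by_cases hl : pvIsTurn l = true
    · cases k with
      | zero => simp [pvTail, pvIdx, hl]
      | succ k' =>
        have h' : k' < (pvIdx ls).length := by
          simpa [pvIdx, hl] using h
        simp [pvTail, pvIdx, hl, ih k' h', List.getElem_map]
    · have h' : k < (pvIdx ls).length := by simpa [pvIdx, hl] using h
      simp [pvTail, pvIdx, hl, ih k h', List.getElem_map]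

-- ===== VERDICT (by name: the statement is the Claim_ definition above) =====
theorem truncate_for_enrichment_spec : Claim_equal_truncate_for_enrichment := by
  intro body _
  show truncate_for_enrichment body = truncate_for_enrichment_alt body
  simp only [truncate_for_enrichment, truncate_for_enrichment_alt]
  set lines := (PySem.Str.split? body "\n").getD [] with hlines
  have hpred : (fun p : Int × String =>
      PySem.Str.startswith p.2 "## User (turn" || PySem.Str.startswith p.2 "## Assistant (turn")
      = (fun p : Int × String => pvIsTurn p.2) := rfl
  have henum : ((PySem.List.enumerate lines 0).filter (fun p => pvIsTurn p.2)).map (fun p => p.1)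
      = (pvIdx lines).map (fun n : Nat => (n : Int)) := by
    rw [pvEnum_filter lines 0]
    exact List.map_congr_left fun n _ => by ring
  rw [hpred, henum]
  have htotal : lines.foldl (fun n l => if pvIsTurn l then n + 1 else n) (0 : Int)
      = ((lines.countP pvIsTurn : Nat) : Int) := by
    simpa using PySem.List.foldl_count_if pvIsTurn lines 0
  rw [htotal, List.length_map, pvIdx_length]
  set T := lines.countP pvIsTurn with hT
  have hTlen : (pvIdx lines).length = T := pvIdx_length lines
  by_cases hle : T ≤ 40
  · rw [if_pos hle, if_pos (by exact_mod_cast hle)]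
  · rw [if_neg hle, if_neg (by intro hc; exact hle (by exact_mod_cast hc))]
    have h20 : 20 < (pvIdx lines).length := by omega
    have hTm20 : T - 20 < (pvIdx lines).length := by omega
    have hcs : PySem.List.pyGetD ((pvIdx lines).map (fun n : Nat => (n : Int))) 20 0
        = (((pvIdx lines)[20]'h20 : Nat) : Int) := by
      rw [PySem.List.pyGetD_ofNat']
      rw [List.getD_eq_getElem _ _ (by simpa using h20)]
      simp
    have hce : PySem.List.pyGetD ((pvIdx lines).map (fun n : Nat => (n : Int))) (-20) 0
        = (((pvIdx lines)[T - 20]'hTm20 : Nat) : Int) := by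
      rw [PySem.List.pyGetD_neg_ofNat _ 20 0 (by omega) (by simp; omega)]
      simp [hTlen]
    rw [hcs, hce, PySem.List.slice_to_natCast, PySem.List.slice_from_natCast,
      pvHead_eq_take lines 20 h20]
    have hnat : ((T : Int) - 20).toNat = T - 20 := by omega
    rw [hnat, pvTail_eq_drop lines (T - 20) hTm20]
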